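-- pv_equiv track=rewrite | github.com/nitesh16s/DS-Algo-Problems | CodeChef/Feb Challenge/team_name.py | teamNames
-- ===== SOURCE A (Python) =====
-- from itertools import combinations
--
-- def teamNames(words, N):
--     names = set()
--     for i in range(N):
--         for j in range(i+1, N):
--             i_name, j_name = list(words[i]), list(words[j])
--             names.add(''.join(i_name))
--             names.add(''.join(j_name))
--
--             # swap
--             i_name[0], j_name[0] = j_name[0], i_name[0]
--             names.add(''.join(i_name))
--             names.add(''.join(j_name))
--
--     names = combinations(names.difference(set(words)), 2)
--     ans = 0
--     for _ in names:
--         ans += 1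
--     return 2*ans
-- ===== SOURCE B (Python) =====
-- def teamNames(words, N):
--     if N < 2:
--         return 0
--     prefix = words[:N]
--     firsts = {w[0] for w in prefix}
--     gen = {c + w[1:] for w in prefix for c in firsts}
--     k = len(gen - set(words))
--     return k * (k - 1)
-- ===== Notes on version B (the rewrite author's own statement) =====
-- stated objective: faster
-- what changed: B replaces A's O(N^2) pair loop (which adds the same four-string patterns over and over) by one pass over words[:N] crossed with the set of distinct first letters, and replaces A's explicit iteration over all 2-combinations by the closed form k*(k-1).
import Mathlib
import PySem

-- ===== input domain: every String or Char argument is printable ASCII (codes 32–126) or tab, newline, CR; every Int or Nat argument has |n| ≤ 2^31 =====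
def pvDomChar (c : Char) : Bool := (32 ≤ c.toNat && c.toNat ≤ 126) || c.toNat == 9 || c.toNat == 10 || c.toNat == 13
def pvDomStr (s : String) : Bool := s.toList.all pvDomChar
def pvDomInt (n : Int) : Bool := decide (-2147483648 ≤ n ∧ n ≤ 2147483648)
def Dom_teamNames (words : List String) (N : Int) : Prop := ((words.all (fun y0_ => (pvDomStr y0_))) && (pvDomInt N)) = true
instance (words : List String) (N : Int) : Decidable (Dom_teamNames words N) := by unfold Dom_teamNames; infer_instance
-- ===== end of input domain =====

-- B replaces A's O(N^2) pair loop and the combination-counting loop by a single pass over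
-- words[:N] times the set of first letters plus the closed form k*(k-1); equivalence of the
-- RETURN value is proved on Pre_ (inputs where A does not raise).

-- ===== PORT A =====
-- words[i]; the out-of-range IndexError case is excluded by Pre_teamNames
def pvWord (words : List String) (i : Int) : String := PySem.List.pyGetD words i ""

-- i_name[0], j_name[0] = j_name[0], i_name[0]; Python raises IndexError on an empty
-- name (excluded by Pre_teamNames), so the catch-all branch is never reached on Pre_
def pvSwap : List Char → List Char → List Char × List Char
  | a :: as, b :: bs => (b :: as, a :: bs)
  | x, y => (x, y)

-- the two nested 'for' loops filling the set 'names'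
def pvNames (words : List String) (N : Int) : PySem.Set String :=
  (PySem.List.pyRange 0 N).foldl (fun s i =>
    (PySem.List.pyRange (i + 1) N).foldl (fun s j =>
      let iname := (pvWord words i).toList
      let jname := (pvWord words j).toList
      let s := PySem.Set.add s (String.ofList iname)
      let s := PySem.Set.add s (String.ofList jname)
      let p := pvSwap iname jname
      let s := PySem.Set.add s (String.ofList p.1)
      PySem.Set.add s (String.ofList p.2)) s) PySem.Set.empty

def teamNames (words : List String) (N : Int) : Int :=
  2 * ((PySem.List.combinations
          (PySem.Set.diff (pvNames words N) (PySem.Set.ofList words)) 2).foldl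
        (fun a _ => a + 1) 0)

-- ===== PORT B =====
-- w[0] as a one-character string; Python raises IndexError on empty w (excluded by Pre_teamNames)
def pvFirst (w : String) : String :=
  match w.toList with
  | c :: _ => String.ofList [c]
  | [] => ""

-- c + w[1:]
def pvMix (c : String) (w : String) : String :=
  String.ofList (c.toList ++ PySem.List.slice w.toList (some 1) none)

-- words[:N]
def pvPrefix (words : List String) (N : Int) : List String :=
  PySem.List.slice words none (some N)

-- {w[0] for w in prefix}
def pvFirsts (words : List String) (N : Int) : PySem.Set String :=
  (pvPrefix words N).foldl (fun s w => PySem.Set.add s (pvFirst w)) PySem.Set.empty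

-- {c + w[1:] for w in prefix for c in firsts}
def pvGen (words : List String) (N : Int) : PySem.Set String :=
  (pvPrefix words N).foldl (fun s w =>
    (pvFirsts words N).foldl (fun s c => PySem.Set.add s (pvMix c w)) s) PySem.Set.empty

def teamNames_alt (words : List String) (N : Int) : Int :=
  if N < 2 then 0
  else
    PySem.Set.len (PySem.Set.diff (pvGen words N) (PySem.Set.ofList words)) *
      (PySem.Set.len (PySem.Set.diff (pvGen words N) (PySem.Set.ofList words)) - 1)

-- ===== PRECONDITION & SPEC =====
-- Pre_ excludes exactly the inputs where A raises IndexError: when at least one pair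
-- (i, j) is visited (2 ≤ N), every accessed index must exist (N ≤ len(words)) and every
-- accessed word must be nonempty (the swap reads name[0]).
def Pre_teamNames (words : List String) (N : Int) : Prop :=
  2 ≤ N → (N ≤ (words.length : Int) ∧ "" ∉ words.take N.toNat)
instance (words : List String) (N : Int) : Decidable (Pre_teamNames words N) := by
  unfold Pre_teamNames; infer_instance

def pvWitness_teamNames : List String × Int := (["ab", "cd"], 2)

def Spec_teamNames (words : List String) (N : Int) (out : Int) : Prop := out = teamNames_alt words N
instance (words : List String) (N : Int) (out : Int) : Decidable (Spec_teamNames words N out) := by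
  unfold Spec_teamNames; infer_instance

-- ===== CLAIM (what is proved, stated in full; the proofs are below) =====
def Claim_equal_teamNames : Prop := ∀ (words : List String) (N : Int), Dom_teamNames words N → Pre_teamNames words N → Spec_teamNames words N (teamNames words N)

-- ===== LEMMAS AND PROOFS =====

-- the common description of both generated sets: first letter of words[a], rest of words[b]
def pvQ (words : List String) (n : Nat) (x : String) : Prop :=
  ∃ a b : Nat, a < n ∧ b < n ∧
    x = String.ofList ((words.getD a "").toList.take 1 ++ (words.getD b "").toList.tail)

theorem pv_mem_foldl {β : Type} (P : β → String → Prop)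
    (step : PySem.Set String → β → PySem.Set String)
    (hstep : ∀ s b x, x ∈ step s b ↔ x ∈ s ∨ P b x)
    (l : List β) (s : PySem.Set String) (x : String) :
    x ∈ l.foldl step s ↔ x ∈ s ∨ ∃ b ∈ l, P b x := by
  induction l generalizing s with
  | nil => simp
  | cons b t ih => simp [List.foldl_cons, ih, hstep]; tauto

theorem pv_nodup_foldl {β : Type} (step : PySem.Set String → β → PySem.Set String)
    (hstep : ∀ s b, s.Nodup → (step s b).Nodup)
    (l : List β) (s : PySem.Set String) (hs : s.Nodup) : (l.foldl step s).Nodup := by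
  induction l generalizing s with
  | nil => exact hs
  | cons b t ih => exact ih _ (hstep _ _ hs)

def pvFour (words : List String) (i j : Int) (x : String) : Prop :=
  x = String.ofList (pvWord words i).toList ∨ x = String.ofList (pvWord words j).toList ∨
  x = String.ofList (pvSwap (pvWord words i).toList (pvWord words j).toList).1 ∨
  x = String.ofList (pvSwap (pvWord words i).toList (pvWord words j).toList).2

theorem pv_mem_names (words : List String) (N : Int) (x : String) :
    x ∈ pvNames words N ↔ ∃ i j : Int, 0 ≤ i ∧ i < j ∧ j < N ∧ pvFour words i j x := by
  unfold pvNames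
  rw [pv_mem_foldl (fun i x => ∃ j : Int, i + 1 ≤ j ∧ j < N ∧ pvFour words i j x)]
  · constructor
    · rintro (h | ⟨i, hi, j, hj1, hj2, hf⟩)
      · simp [PySem.Set.empty] at h
      · rw [PySem.List.mem_pyRange_one] at hi
        exact ⟨i, j, hi.1, by omega, hj2, hf⟩
    · rintro ⟨i, j, h0, h1, h2, hf⟩
      exact Or.inr ⟨i, PySem.List.mem_pyRange_one.2 ⟨h0, by omega⟩, j, by omega, h2, hf⟩
  · intro s i x
    rw [pv_mem_foldl (fun j x => pvFour words i j x)]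
    · constructor
      · rintro (h | ⟨j, hj, hf⟩)
        · exact Or.inl h
        · rw [PySem.List.mem_pyRange_one] at hj
          exact Or.inr ⟨j, hj.1, hj.2, hf⟩
      · rintro (h | ⟨j, hj1, hj2, hf⟩)
        · exact Or.inl h
        · exact Or.inr ⟨j, PySem.List.mem_pyRange_one.2 ⟨hj1, hj2⟩, hf⟩
    · intro s j x
      simp only [PySem.Set.mem_add, pvFour]
      tauto

theorem pv_mem_gen (words : List String) (N : Int) (x : String) :
    x ∈ pvGen words N ↔
      ∃ w ∈ pvPrefix words N, ∃ v ∈ pvPrefix words N, x = pvMix (pvFirst v) w := by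
  unfold pvGen
  rw [pv_mem_foldl (fun w x => ∃ c ∈ pvFirsts words N, x = pvMix c w)]
  · simp only [PySem.Set.empty, List.not_mem_nil, false_or]
    constructor
    · rintro ⟨w, hw, c, hc, hx⟩
      unfold pvFirsts at hc
      rw [PySem.Set.mem_foldl_add] at hc
      rcases hc with h | ⟨v, hv, rfl⟩
      · simp [PySem.Set.empty] at h
      · exact ⟨w, hw, v, hv, hx⟩
    · rintro ⟨w, hw, v, hv, hx⟩
      refine ⟨w, hw, pvFirst v, ?_, hx⟩
      unfold pvFirsts
      rw [PySem.Set.mem_foldl_add]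
      exact Or.inr ⟨v, hv, rfl⟩
  · intro s w x
    rw [PySem.Set.mem_foldl_add]

theorem pv_take_one_append_tail {l : List Char} (h : l ≠ []) : l.take 1 ++ l.tail = l := by
  cases l with
  | nil => simp at h
  | cons a t => simp

-- on Pre_ with 2 ≤ N, both generated sets are described by pvQ
theorem pv_names_iff_Q (words : List String) (N : Int) (hN : 2 ≤ N)
    (hlen : N ≤ (words.length : Int)) (hne : "" ∉ words.take N.toNat) (x : String) :
    x ∈ pvNames words N ↔ pvQ words N.toNat x := by
  have hword : ∀ i : Int, 0 ≤ i → i < N → pvWord words i = words.getD i.toNat "" := by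
    intro i h0 h1
    rw [pvWord, PySem.List.pyGetD_of_nonneg _ _ h0]
  have hnz : ∀ a : Nat, a < N.toNat → (words.getD a "").toList ≠ [] := by
    intro a ha hnil
    have halen : a < words.length := by omega
    have : words.getD a "" ∈ words.take N.toNat := by
      rw [List.mem_iff_getElem]
      refine ⟨a, by simp; omega, ?_⟩
      rw [List.getElem_take, List.getD_eq_getElem _ _ halen]
    exact hne (String.toList_eq_nil_iff.mp hnil ▸ ‹words.getD a "" ∈ words.take N.toNat›)
  rw [pv_mem_names]
  constructor
  · rintro ⟨i, j, h0, h1, h2, hf⟩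
    have hi' : i.toNat < N.toNat := by omega
    have hj' : j.toNat < N.toNat := by omega
    have hwi := hword i h0 (by omega)
    have hwj := hword j (by omega) h2
    have hnei := hnz i.toNat hi'
    have hnej := hnz j.toNat hj'
    obtain ⟨ci, ti, hli⟩ : ∃ c t, (words.getD i.toNat "").toList = c :: t := by
      cases h : (words.getD i.toNat "").toList with
      | nil => exact absurd h hnei
      | cons c t => exact ⟨c, t, rfl⟩
    obtain ⟨cj, tj, hlj⟩ : ∃ c t, (words.getD j.toNat "").toList = c :: t := by
      cases h : (words.getD j.toNat "").toList with
      | nil => exact absurd h hnej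
      | cons c t => exact ⟨c, t, rfl⟩
    rcases hf with h | h | h | h
    · exact ⟨i.toNat, i.toNat, hi', hi', by rw [h, hwi, hli]; simp⟩
    · exact ⟨j.toNat, j.toNat, hj', hj', by rw [h, hwj, hlj]; simp⟩
    · refine ⟨j.toNat, i.toNat, hj', hi', ?_⟩
      rw [h, hwi, hwj, hli, hlj]; simp [pvSwap]
    · refine ⟨i.toNat, j.toNat, hi', hj', ?_⟩
      rw [h, hwi, hwj, hli, hlj]; simp [pvSwap]
  · rintro ⟨a, b, ha, hb, rfl⟩
    have hia : ((a : Int)).toNat = a := by omega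
    have hib : ((b : Int)).toNat = b := by omega
    rcases Nat.lt_trichotomy a b with hab | hab | hab
    · refine ⟨(a : Int), (b : Int), by omega, by omega, by omega, ?_⟩
      right; right; right
      rw [hword _ (by omega) (by omega), hword _ (by omega) (by omega), hia, hib]
      obtain ⟨ca, ta, hla⟩ : ∃ c t, (words.getD a "").toList = c :: t := by
        cases h : (words.getD a "").toList with
        | nil => exact absurd h (hnz a ha)
        | cons c t => exact ⟨c, t, rfl⟩
      obtain ⟨cb, tb, hlb⟩ : ∃ c t, (words.getD b "").toList = c :: t := by
        cases h : (words.getD b "").toList with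
        | nil => exact absurd h (hnz b hb)
        | cons c t => exact ⟨c, t, rfl⟩
      rw [hla, hlb]; simp [pvSwap]
    · subst hab
      by_cases h0 : a = 0
      · subst h0
        refine ⟨(0 : Int), 1, by omega, by omega, by omega, ?_⟩
        left
        rw [hword 0 (by omega) (by omega)]
        simp only [Int.toNat_zero]
        rw [pv_take_one_append_tail (hnz 0 ha)]
      · refine ⟨(0 : Int), (a : Int), by omega, by omega, by omega, ?_⟩
        right; left
        rw [hword _ (by omega) (by omega), hia, pv_take_one_append_tail (hnz a ha)]
    · refine ⟨(b : Int), (a : Int), by omega, by omega, by omega, ?_⟩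
      right; right; left
      rw [hword _ (by omega) (by omega), hword _ (by omega) (by omega), hia, hib]
      obtain ⟨ca, ta, hla⟩ : ∃ c t, (words.getD a "").toList = c :: t := by
        cases h : (words.getD a "").toList with
        | nil => exact absurd h (hnz a ha)
        | cons c t => exact ⟨c, t, rfl⟩
      obtain ⟨cb, tb, hlb⟩ : ∃ c t, (words.getD b "").toList = c :: t := by
        cases h : (words.getD b "").toList with
        | nil => exact absurd h (hnz b hb)
        | cons c t => exact ⟨c, t, rfl⟩
      rw [hla, hlb]; simp [pvSwap]

theorem pv_gen_iff_Q (words : List String) (N : Int) (hN : 2 ≤ N)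
    (hlen : N ≤ (words.length : Int)) (hne : "" ∉ words.take N.toNat) (x : String) :
    x ∈ pvGen words N ↔ pvQ words N.toNat x := by
  have hpre : pvPrefix words N = words.take N.toNat := by
    rw [pvPrefix, show N = ((N.toNat : Nat) : Int) by omega, PySem.List.slice_to_natCast,
      Int.toNat_natCast]
  have hmem : ∀ w, w ∈ pvPrefix words N ↔ ∃ a : Nat, a < N.toNat ∧ words.getD a "" = w := by
    intro w
    rw [hpre, List.mem_iff_getElem]
    constructor
    · rintro ⟨a, h, rfl⟩
      have h' : a < N.toNat := by
        have := h; simp at this; omega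
      have halen : a < words.length := by omega
      exact ⟨a, h', by rw [List.getElem_take, List.getD_eq_getElem _ _ halen]⟩
    · rintro ⟨a, ha, rfl⟩
      have halen : a < words.length := by omega
      refine ⟨a, by simp; omega, ?_⟩
      rw [List.getElem_take, List.getD_eq_getElem _ _ halen]
  have hnz : ∀ a : Nat, a < N.toNat → (words.getD a "").toList ≠ [] := by
    intro a ha hnil
    have halen : a < words.length := by omega
    have hmem' : words.getD a "" ∈ words.take N.toNat := by
      rw [List.mem_iff_getElem]
      refine ⟨a, by simp; omega, ?_⟩
      rw [List.getElem_take, List.getD_eq_getElem _ _ halen]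
    exact hne (String.toList_eq_nil_iff.mp hnil ▸ hmem')
  rw [pv_mem_gen]
  constructor
  · rintro ⟨w, hw, v, hv, rfl⟩
    obtain ⟨b, hb, rfl⟩ := (hmem w).1 hw
    obtain ⟨a, ha, rfl⟩ := (hmem v).1 hv
    refine ⟨a, b, ha, hb, ?_⟩
    obtain ⟨ca, ta, hla⟩ : ∃ c t, (words.getD a "").toList = c :: t := by
      cases h : (words.getD a "").toList with
      | nil => exact absurd h (hnz a ha)
      | cons c t => exact ⟨c, t, rfl⟩
    rw [pvMix, pvFirst, hla]
    simp [PySem.List.slice_from_one]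
  · rintro ⟨a, b, ha, hb, rfl⟩
    refine ⟨words.getD b "", (hmem _).2 ⟨b, hb, rfl⟩, words.getD a "", (hmem _).2 ⟨a, ha, rfl⟩, ?_⟩
    obtain ⟨ca, ta, hla⟩ : ∃ c t, (words.getD a "").toList = c :: t := by
      cases h : (words.getD a "").toList with
      | nil => exact absurd h (hnz a ha)
      | cons c t => exact ⟨c, t, rfl⟩
    rw [pvMix, pvFirst, hla]
    simp [PySem.List.slice_from_one]

theorem pv_nodup_names (words : List String) (N : Int) : (pvNames words N).Nodup := by
  unfold pvNames
  apply pv_nodup_foldl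
  · intro s i hs
    apply pv_nodup_foldl
    · intro s j hs
      simp only []
      exact PySem.Set.nodup_add _ _ (PySem.Set.nodup_add _ _ (PySem.Set.nodup_add _ _ (PySem.Set.nodup_add _ _ hs)))
    · exact hs
  · exact List.nodup_nil

theorem pv_nodup_gen (words : List String) (N : Int) : (pvGen words N).Nodup := by
  unfold pvGen
  apply pv_nodup_foldl
  · intro s w hs
    apply pv_nodup_foldl
    · intro s c hs
      exact PySem.Set.nodup_add _ _ hs
    · exact hs
  · exact List.nodup_nil

theorem pv_length_eq_of_mem_iff (l1 l2 : List String) (h1 : l1.Nodup) (h2 : l2.Nodup)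
    (h : ∀ x, x ∈ l1 ↔ x ∈ l2) : l1.length = l2.length := by
  rw [← List.toFinset_card_of_nodup h1, ← List.toFinset_card_of_nodup h2]
  congr 1
  ext x
  simp only [List.mem_toFinset]
  exact h x

theorem pv_comb2_len (l : List String) :
    2 * ((PySem.List.combinations l 2).length : Int) = (l.length : Int) * ((l.length : Int) - 1) := by
  induction l with
  | nil => simp [PySem.List.combinations_nil_succ]
  | cons x xs ih =>
    rw [show (2 : Nat) = 1 + 1 from rfl, PySem.List.combinations_cons_succ,
      PySem.List.combinations_one]
    simp only [List.length_append, List.length_map, List.length_cons]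
    push_cast
    push_cast at ih
    ring_nf
    ring_nf at ih
    nlinarith [ih]

theorem pv_count_eq_len (l : List (List String)) :
    l.foldl (fun a _ => a + 1) (0 : Int) = (l.length : Int) := by
  rw [PySem.List.foldl_add l (fun _ => 1), PySem.List.sum_map_const_int]
  ring

-- ===== VERDICT (by name: the statement is the Claim_ definition above) =====
theorem teamNames_spec : Claim_equal_teamNames := by
  intro words N _ hpre
  unfold Spec_teamNames teamNames teamNames_alt
  by_cases hN : N < 2
  · -- no pair is visited: names is empty, both results are 0
    have hempty : pvNames words N = [] := by
      apply List.eq_nil_iff_forall_not_mem.2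
      intro x hx
      obtain ⟨i, j, h0, h1, h2, _⟩ := (pv_mem_names words N x).1 hx
      omega
    have hdiff : PySem.Set.diff (pvNames words N) (PySem.Set.ofList words) = [] := by
      apply List.eq_nil_iff_forall_not_mem.2
      intro x hx
      have := (PySem.Set.mem_diff _ _ x).1 hx
      rw [hempty] at this
      simp at this
    rw [hdiff]
    simp [hN, PySem.List.combinations_nil_succ]
  · obtain ⟨hlen, hne⟩ := hpre (by omega)
    have hN2 : 2 ≤ N := by omega
    set LA := PySem.Set.diff (pvNames words N) (PySem.Set.ofList words) with hLA
    set LB := PySem.Set.diff (pvGen words N) (PySem.Set.ofList words) with hLB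
    have hmm : ∀ x, x ∈ LA ↔ x ∈ LB := by
      intro x
      rw [hLA, hLB, PySem.Set.mem_diff, PySem.Set.mem_diff,
        pv_names_iff_Q words N hN2 hlen hne, ← pv_gen_iff_Q words N hN2 hlen hne]
    have hlen_eq : LA.length = LB.length :=
      pv_length_eq_of_mem_iff _ _
        (PySem.Set.nodup_diff _ _ (pv_nodup_names words N))
        (PySem.Set.nodup_diff _ _ (pv_nodup_gen words N)) hmm
    rw [if_neg hN]
    rw [pv_count_eq_len, pv_comb2_len]
    unfold PySem.Set.len
    rw [hlen_eq]
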